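-- pv_equiv track=rewrite | github.com/anushka369/30-Days-DSA-Bootcamp | DAY 04: SUBARRAYS/Number of Longest Tribonacci Subarray/solution.py | count_tribonacci_subarrays
-- ===== SOURCE A (Python) =====
-- def generate_tribonacci_numbers(max_value):
--     tribonacci = [0, 1, 1]
--
--     while True:
--         next_value = tribonacci[-1] + tribonacci[-2] + tribonacci[-3]
--         if next_value > max_value:
--             break
--
--         tribonacci.append(next_value)
--     return set(tribonacci)  # Return as a set for O(1) lookups
--
-- def count_tribonacci_subarrays(arr):
--     MOD = 10**9 + 7
--     max_value = 10**5
--     tribonacci_set = generate_tribonacci_numbers(max_value)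
--
--     count = 0
--     current_length = 0
--
--     for num in arr:
--         if num in tribonacci_set:
--             current_length += 1
--
--         else:
--             if current_length > 0:
--                 count += (current_length * (current_length + 1)) // 2
--                 count %= MOD
--
--             current_length = 0
--
--     # If there was a valid segment at the end
--     if current_length > 0:
--         count += (current_length * (current_length + 1)) // 2
--         count %= MOD
--
--     return count
-- ===== SOURCE B (Python) =====
-- def count_tribonacci_subarrays(arr):
--     MOD = 10**9 + 7
--     max_value = 10**5
--     # tribonacci set via three rolling variables
--     trib = {0, 1}
--     a, b, c = 0, 1, 1
--     while a + b + c <= max_value: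
--         a, b, c = b, c, a + b + c
--         trib.add(c)
--     # stage 1: positions of the separators (non-tribonacci elements),
--     # with sentinels -1 and len(arr)
--     bad = [-1]
--     i = 0
--     for x in arr:
--         if x not in trib:
--             bad.append(i)
--         i += 1
--     bad.append(len(arr))
--     # stage 2: each maximal tribonacci run is the gap between consecutive
--     # separators; a run of length g contributes g*(g+1)//2 subarrays
--     count = 0
--     for p, q in zip(bad, bad[1:]):
--         g = q - p - 1
--         count = (count + g * (g + 1) // 2) % MOD
--     return count
-- ===== Notes on version B (the rewrite author's own statement) =====
-- stated objective: alternative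
-- what changed: B replaces A's run-length state machine with a staged separator-position algorithm: it first records the indices of all non-tribonacci elements (with sentinels -1 and len(arr)), then sums g*(g+1)//2 over the gaps between consecutive separators; the tribonacci set is built with three rolling variables instead of a list with negative indexing.
import Mathlib
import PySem

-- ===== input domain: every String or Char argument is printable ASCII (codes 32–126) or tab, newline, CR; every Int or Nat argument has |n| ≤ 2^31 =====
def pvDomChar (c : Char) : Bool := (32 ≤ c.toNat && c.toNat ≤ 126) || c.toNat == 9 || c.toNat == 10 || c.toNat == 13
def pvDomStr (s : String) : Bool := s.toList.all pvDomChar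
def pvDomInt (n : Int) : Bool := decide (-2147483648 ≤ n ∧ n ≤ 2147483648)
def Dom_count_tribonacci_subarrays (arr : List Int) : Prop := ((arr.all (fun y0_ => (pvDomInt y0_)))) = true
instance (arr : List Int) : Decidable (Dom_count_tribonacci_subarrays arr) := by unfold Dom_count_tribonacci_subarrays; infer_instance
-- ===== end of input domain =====

-- B replaces A's run-length state machine with a staged algorithm: record the positions of the
-- non-tribonacci separators (with sentinels), then sum g*(g+1)//2 over the gaps between
-- consecutive separators (objective: alternative).

-- ===== PORT A =====
-- the 'while True' append loop of generate_tribonacci_numbers; fuel is only a totality guard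
-- (values grow geometrically, so 64 steps are far more than ever taken before next_value > max_value)
def genTribListA (fuel : Nat) (trib : List Int) (maxv : Int) : List Int :=
  match fuel with
  | 0 => trib
  | fuel + 1 =>
    let next := (PySem.List.pyGet? trib (-1)).getD 0 + (PySem.List.pyGet? trib (-2)).getD 0
                + (PySem.List.pyGet? trib (-3)).getD 0
    if next > maxv then trib else genTribListA fuel (trib ++ [next]) maxv

def generate_tribonacci_numbers (maxv : Int) : PySem.Set Int :=
  PySem.Set.ofList (genTribListA 64 [0, 1, 1] maxv)

-- loop body of A: state (count, current_length)
def stepA (ts : PySem.Set Int) (st : Int × Int) (num : Int) : Int × Int :=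
  if PySem.Set.contains ts num then (st.1, st.2 + 1)
  else (if st.2 > 0 then
          PySem.Int.mod (st.1 + PySem.Int.floordiv (st.2 * (st.2 + 1)) 2) 1000000007
        else st.1, 0)

def count_tribonacci_subarrays (arr : List Int) : Int :=
  let ts := generate_tribonacci_numbers 100000
  let st := arr.foldl (stepA ts) (0, 0)
  if st.2 > 0 then
    PySem.Int.mod (st.1 + PySem.Int.floordiv (st.2 * (st.2 + 1)) 2) 1000000007
  else st.1

-- ===== PORT B =====
-- the 'while a+b+c <= max_value' rolling-variable loop; fuel is only a totality guard
def genTribB (fuel : Nat) (s : PySem.Set Int) (a b c maxv : Int) : PySem.Set Int :=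
  match fuel with
  | 0 => s
  | fuel + 1 =>
    if a + b + c ≤ maxv then genTribB fuel (PySem.Set.add s (a + b + c)) b c (a + b + c) maxv
    else s

-- stage 1 of B: the separator-position list 'bad' (fold state = (bad, i))
def badsB (ts : PySem.Set Int) (arr : List Int) : List Int :=
  let st := arr.foldl
    (fun (st : List Int × Int) x =>
      (if ¬ PySem.Set.contains ts x then st.1 ++ [st.2] else st.1, st.2 + 1))
    ([(-1 : Int)], (0 : Int))
  st.1 ++ [(arr.length : Int)]

-- stage 2 of B: loop body over the zipped consecutive separator pairs
def gapStep (c : Int) (pq : Int × Int) : Int :=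
  PySem.Int.mod (c + PySem.Int.floordiv ((pq.2 - pq.1 - 1) * ((pq.2 - pq.1 - 1) + 1)) 2) 1000000007

def count_tribonacci_subarrays_alt (arr : List Int) : Int :=
  let ts := genTribB 64 (PySem.Set.ofList [0, 1]) 0 1 1 100000
  let bad := badsB ts arr
  (bad.zip (bad.drop 1)).foldl gapStep 0    -- bad[1:] = drop 1 (nonnegative slice start)

-- ===== PRECONDITION & SPEC =====
def Spec_count_tribonacci_subarrays (arr : List Int) (out : Int) : Prop := out = count_tribonacci_subarrays_alt arr
instance (arr : List Int) (out : Int) : Decidable (Spec_count_tribonacci_subarrays arr out) := by unfold Spec_count_tribonacci_subarrays; infer_instance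

-- ===== CLAIM (what is proved, stated in full; the proofs are below) =====
def Claim_equal_count_tribonacci_subarrays : Prop := ∀ (arr : List Int), Dom_count_tribonacci_subarrays arr → Spec_count_tribonacci_subarrays arr (count_tribonacci_subarrays arr)

-- ===== LEMMAS AND PROOFS =====

-- the two set-building loops produce the very same distinct-element list
lemma trib_sets_eq :
    generate_tribonacci_numbers 100000 = genTribB 64 (PySem.Set.ofList [0, 1]) 0 1 1 100000 := by
  decide

-- the triangular term both programs use
def triA (k : Int) : Int := PySem.Int.floordiv (k * (k + 1)) 2

lemma triA_nonneg (k : Int) (h : 0 ≤ k) : 0 ≤ triA k := by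
  unfold triA
  rw [PySem.Int.floordiv_eq_ediv_of_pos (by norm_num)]
  exact Int.ediv_nonneg (by nlinarith) (by norm_num)

lemma triA_zero : triA 0 = 0 := by decide

-- reference value: sum of triangular terms over the maximal runs, la = pending run length
def Ssum (ts : PySem.Set Int) : List Int → Int → Int
  | [], la => triA la
  | x :: xs, la =>
    if PySem.Set.contains ts x then Ssum ts xs (la + 1) else triA la + Ssum ts xs 0

lemma Ssum_nonneg (ts : PySem.Set Int) (xs : List Int) (la : Int) (h : 0 ≤ la) :
    0 ≤ Ssum ts xs la := by
  induction xs generalizing la with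
  | nil => exact triA_nonneg _ h
  | cons x xs ih =>
    simp only [Ssum]
    split
    · exact ih _ (by omega)
    · have := triA_nonneg la h
      have := ih 0 le_rfl
      omega

-- A's loop invariant: result from state (ca, la) is (ca + Ssum xs la) mod 1e9+7
lemma loopA (ts : PySem.Set Int) (xs : List Int) (ca la : Int)
    (h1 : 0 ≤ ca) (h2 : ca < 1000000007) (h3 : 0 ≤ la) :
    (if (xs.foldl (stepA ts) (ca, la)).2 > 0 then
        PySem.Int.mod ((xs.foldl (stepA ts) (ca, la)).1
          + PySem.Int.floordiv ((xs.foldl (stepA ts) (ca, la)).2 * ((xs.foldl (stepA ts) (ca, la)).2 + 1)) 2) 1000000007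
      else (xs.foldl (stepA ts) (ca, la)).1)
    = PySem.Int.mod (ca + Ssum ts xs la) 1000000007 := by
  have hM : (0:Int) < 1000000007 := by norm_num
  induction xs generalizing ca la with
  | nil =>
    simp only [List.foldl_nil, Ssum]
    by_cases h : la > 0
    · rw [if_pos h]; rfl
    · rw [if_neg h]
      have : la = 0 := by omega
      subst this
      rw [triA_zero, add_zero, PySem.Int.mod_eq_emod_of_pos hM]
      omega
  | cons x xs ih =>
    simp only [List.foldl_cons, Ssum]
    by_cases hx : PySem.Set.contains ts x
    · simp only [stepA, hx, if_pos]
      exact ih ca (la + 1) h1 h2 (by omega)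
    · simp only [stepA, hx, Bool.false_eq_true, ite_false]
      by_cases hla : la > 0
      · simp only [hla, ite_true]
        rw [ih _ 0 (PySem.Int.mod_nonneg _ hM) (PySem.Int.mod_lt _ hM) le_rfl]
        have hs : 0 ≤ Ssum ts xs 0 := Ssum_nonneg ts xs 0 le_rfl
        have ht : 0 ≤ triA la := triA_nonneg la h3
        show PySem.Int.mod (PySem.Int.mod (ca + triA la) 1000000007 + Ssum ts xs 0) 1000000007
            = PySem.Int.mod (ca + (triA la + Ssum ts xs 0)) 1000000007
        rw [PySem.Int.mod_eq_emod_of_pos hM, PySem.Int.mod_eq_emod_of_pos hM,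
            PySem.Int.mod_eq_emod_of_pos hM]
        omega
      · simp only [hla, ite_false]
        have : la = 0 := by omega
        subst this
        rw [ih ca 0 h1 h2 le_rfl, triA_zero, zero_add]
  
-- positions of the non-tribonacci elements of xs, indexed from i0
def posFrom (ts : PySem.Set Int) (i0 : Int) : List Int → List Int
  | [] => []
  | x :: xs =>
    if PySem.Set.contains ts x then posFrom ts (i0 + 1) xs else i0 :: posFrom ts (i0 + 1) xs

-- B's stage-1 fold builds exactly acc ++ posFrom
lemma badsB_fold (ts : PySem.Set Int) (xs : List Int) (acc : List Int) (i0 : Int) :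
    xs.foldl
      (fun (st : List Int × Int) x =>
        (if ¬ PySem.Set.contains ts x then st.1 ++ [st.2] else st.1, st.2 + 1))
      (acc, i0)
    = (acc ++ posFrom ts i0 xs, i0 + xs.length) := by
  induction xs generalizing acc i0 with
  | nil => simp [posFrom]
  | cons x xs ih =>
    simp only [List.foldl_cons, posFrom]
    by_cases hx : PySem.Set.contains ts x
    · simp only [hx, not_true, ite_false, ite_true, ih]
      rw [Prod.ext_iff]
      refine ⟨rfl, ?_⟩
      simp only [List.length_cons]; push_cast; ring
    · simp only [hx, not_false_iff, ite_true, Bool.false_eq_true, ite_false, ih]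
      rw [Prod.ext_iff]
      refine ⟨by simp, ?_⟩
      simp only [List.length_cons]; push_cast; ring

-- B's stage-2 zip fold, reformulated with the previous separator threaded through
def mfold (p c : Int) : List Int → Int
  | [] => c
  | q :: rest => mfold q (PySem.Int.mod (c + triA (q - p - 1)) 1000000007) rest

lemma zip_fold_eq_mfold (l : List Int) (p c : Int) :
    ((p :: l).zip ((p :: l).drop 1)).foldl gapStep c = mfold p c l := by
  induction l generalizing p c with
  | nil => simp [mfold]
  | cons q rest ih =>
    simp only [List.drop_one, List.tail_cons, List.zip_cons_cons, List.foldl_cons, mfold]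
    -- note: after drop_one the tail is computed
    have : gapStep c (p, q) = PySem.Int.mod (c + triA (q - p - 1)) 1000000007 := by
      simp [gapStep, triA]
    rw [this, ← ih q]
    simp

-- B's invariant: folding the gaps of the separator list equals (c + Ssum) mod 1e9+7
lemma loopB (ts : PySem.Set Int) (xs : List Int) (i0 p c : Int)
    (h1 : 0 ≤ c) (h2 : c < 1000000007) (h3 : p + 1 ≤ i0) :
    mfold p c (posFrom ts i0 xs ++ [i0 + xs.length])
    = PySem.Int.mod (c + Ssum ts xs (i0 - 1 - p)) 1000000007 := by
  have hM : (0:Int) < 1000000007 := by norm_num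
  induction xs generalizing i0 p c with
  | nil =>
    simp only [posFrom, List.nil_append, List.length_nil, Nat.cast_zero, add_zero, mfold, Ssum]
    have : i0 - p - 1 = i0 - 1 - p := by ring
    rw [this]
  | cons x xs ih =>
    simp only [posFrom, Ssum, List.length_cons]
    by_cases hx : PySem.Set.contains ts x
    · simp only [hx, ite_true]
      have hlen : i0 + ((xs.length : Int) + 1) = (i0 + 1) + (xs.length : Int) := by ring
      push_cast
      rw [hlen, ih (i0 + 1) p c h1 h2 (by omega)]
      have : i0 + 1 - 1 - p = i0 - 1 - p + 1 := by ring
      rw [this]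
    · simp only [hx, Bool.false_eq_true, ite_false, List.cons_append, mfold]
      have hlen : i0 + ((xs.length : Int) + 1) = (i0 + 1) + (xs.length : Int) := by ring
      push_cast
      rw [hlen, ih (i0 + 1) i0 _ (PySem.Int.mod_nonneg _ hM) (PySem.Int.mod_lt _ hM) (by omega)]
      have e1 : i0 - p - 1 = i0 - 1 - p := by ring
      have e2 : i0 + 1 - 1 - i0 = 0 := by ring
      rw [e1, e2]
      have hs : 0 ≤ Ssum ts xs 0 := Ssum_nonneg ts xs 0 le_rfl
      have ht : 0 ≤ triA (i0 - 1 - p) := triA_nonneg _ (by omega)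
      rw [PySem.Int.mod_eq_emod_of_pos hM, PySem.Int.mod_eq_emod_of_pos hM,
          PySem.Int.mod_eq_emod_of_pos hM]
      omega

-- ===== VERDICT (by name: the statement is the Claim_ definition above) =====
theorem count_tribonacci_subarrays_spec : Claim_equal_count_tribonacci_subarrays := by
  intro arr _
  unfold Spec_count_tribonacci_subarrays count_tribonacci_subarrays count_tribonacci_subarrays_alt
  rw [trib_sets_eq]
  set ts := genTribB 64 (PySem.Set.ofList [0, 1]) 0 1 1 100000 with hts
  have hA := loopA ts arr 0 0 le_rfl (by norm_num) le_rfl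
  have hbads : badsB ts arr = (-1 : Int) :: (posFrom ts 0 arr ++ [(arr.length : Int)]) := by
    unfold badsB
    rw [badsB_fold ts arr [(-1 : Int)] 0]
    simp
  have hB : ((badsB ts arr).zip ((badsB ts arr).drop 1)).foldl gapStep 0
      = PySem.Int.mod (0 + Ssum ts arr 0) 1000000007 := by
    rw [hbads, zip_fold_eq_mfold]
    have : (arr.length : Int) = 0 + (arr.length : Int) := by ring
    rw [this, loopB ts arr 0 (-1) 0 le_rfl (by norm_num) (by omega)]
    norm_num
  simpa using hA.trans hB.symm
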